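-- pv_equiv track=rewrite | github.com/JavierCorralLizarraga/EstructurasDeDatos | Calculadora/Practica2Eq3.py | checarOperaYNumer
-- ===== SOURCE A (Python) =====
-- def esOperador(char): # listo
--     if '+' == char or '-' == char or '/' == char or '^' == char or '*' == char:
--         return True
--     else:
--         return False
--
-- def esNumero_o_Punto(num): # listo
--     aceptados = ['0', '1', '2', '3', '4', '5', '6', '7', '8', '9', '.']
--     if num in aceptados:
--         return True
--     else:
--         return False
--
-- def checarOperaYNumer (str):  #checa qye no hay más operadores que números en una expresión
--     i = 0
--     num = 0  #contador de numeros
--     op = 0   #contador de operadores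
--     ant='#'
--     while( (i < len(str))):
--         act = str[i]
--         if(esNumero_o_Punto(act) and not esNumero_o_Punto(ant)): #por si es un numero de varios digitos, etnonces no sumarlo
--             num = num + 1
--         elif (esOperador(act) and not esOperador(ant)):  #si es un numero negativo no contarlo
--             op = op + 1
--         ant = act
--         i = i + 1
--     if num > op:
--         return True
--     else:
--         return False
-- ===== SOURCE B (Python) =====
-- def checarOperaYNumer(str):
--     def cls(c):
--         if c in '0123456789.':
--             return 0
--         if c in '+-*/^':
--             return 1
--         return 2
--     classes = [cls(c) for c in str]
--     groups = [k for k, prev in zip(classes, [3] + classes) if k != prev]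
--     return groups.count(0) > groups.count(1)
-- ===== Notes on version B (the rewrite author's own statement) =====
-- stated objective: faster
-- what changed: Replaces the previous-character transition tracking inside one indexed while-loop by a three-stage pipeline: classify every character (num/op/other), collapse consecutive equal classes by zipping the class list with its shifted copy, and compare the counts of num-groups and op-groups.
import Mathlib
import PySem

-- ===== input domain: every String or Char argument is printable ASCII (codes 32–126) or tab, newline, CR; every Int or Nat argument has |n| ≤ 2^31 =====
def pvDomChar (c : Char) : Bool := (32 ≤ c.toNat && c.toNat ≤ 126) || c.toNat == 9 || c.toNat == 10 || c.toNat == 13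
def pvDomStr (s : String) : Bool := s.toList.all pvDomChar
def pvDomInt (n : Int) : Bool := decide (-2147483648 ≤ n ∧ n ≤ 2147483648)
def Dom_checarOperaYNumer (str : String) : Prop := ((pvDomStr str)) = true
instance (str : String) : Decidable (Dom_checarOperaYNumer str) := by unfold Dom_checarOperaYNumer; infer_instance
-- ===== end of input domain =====

-- B replaces A's previous-character transition loop by classify → collapse-runs (zip with shifted list) → count groups; objective: faster by a constant factor (measured).

-- ===== PORT A =====
def esOperador (c : Char) : Bool :=
  if c = '+' || c = '-' || c = '/' || c = '^' || c = '*' then true else false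

def esNumero_o_Punto (c : Char) : Bool :=
  if ['0','1','2','3','4','5','6','7','8','9','.'].contains c then true else false

-- the while-loop of A: walks the characters carrying (num, op, ant)
def pvLoopA : List Char → Int → Int → Char → Int × Int
  | [], num, op, _ => (num, op)
  | act :: rest, num, op, ant =>
    if esNumero_o_Punto act && !esNumero_o_Punto ant then
      pvLoopA rest (num + 1) op act
    else if esOperador act && !esOperador ant then
      pvLoopA rest num (op + 1) act
    else
      pvLoopA rest num op act

def checarOperaYNumer (str : String) : Bool :=
  let r := pvLoopA str.toList 0 0 '#'
  if r.1 > r.2 then true else false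

-- ===== PORT B =====
def pvCls (c : Char) : Nat :=
  if ['0','1','2','3','4','5','6','7','8','9','.'].contains c then 0
  else if ['+','-','*','/','^'].contains c then 1
  else 2

def checarOperaYNumer_alt (str : String) : Bool :=
  let classes := str.toList.map pvCls
  let groups := ((classes.zip (3 :: classes)).filter (fun p => p.1 ≠ p.2)).map Prod.fst
  decide (groups.count 0 > groups.count 1)

-- ===== PRECONDITION & SPEC =====
def Spec_checarOperaYNumer (str : String) (out : Bool) : Prop := out = checarOperaYNumer_alt str
instance (str : String) (out : Bool) : Decidable (Spec_checarOperaYNumer str out) := by unfold Spec_checarOperaYNumer; infer_instance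

-- ===== CLAIM (what is proved, stated in full; the proofs are below) =====
def Claim_equal_checarOperaYNumer : Prop := ∀ (str : String), Dom_checarOperaYNumer str → Spec_checarOperaYNumer str (checarOperaYNumer str)

-- ===== LEMMAS AND PROOFS =====

-- number of maximal runs of class v, given previous class p
def pvG (v p : Nat) : List Nat → Nat
  | [] => 0
  | c :: cs => (if c = v ∧ c ≠ p then 1 else 0) + pvG v c cs

theorem pvCls_zero (c : Char) : (pvCls c = 0) ↔ (esNumero_o_Punto c = true) := by
  unfold pvCls esNumero_o_Punto
  split_ifs <;> simp_all

theorem pvMemOp (c : Char) : esOperador c = true ↔ c ∈ (['+','-','*','/','^'] : List Char) := by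
  simp [esOperador]
  tauto

theorem pvNumNotOp (c : Char)
    (h : c ∈ (['0','1','2','3','4','5','6','7','8','9','.'] : List Char)) :
    esOperador c = false := by
  fin_cases h <;> decide

theorem pvCls_one (c : Char) : (pvCls c = 1) ↔ (esOperador c = true) := by
  unfold pvCls
  by_cases h1 : c ∈ (['0','1','2','3','4','5','6','7','8','9','.'] : List Char)
  · rw [if_pos (by simpa using h1)]
    simp [pvNumNotOp c h1]
  · rw [if_neg (by simpa using h1)]
    by_cases h2 : c ∈ (['+','-','*','/','^'] : List Char)
    · rw [if_pos (by simpa using h2)]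
      simp [pvMemOp, h2]
    · rw [if_neg (by simpa using h2)]
      simp [pvMemOp, h2]

theorem pvZipCount (v : Nat) (p : Nat) (cs : List Nat) :
    (((cs.zip (p :: cs)).filter (fun q => q.1 ≠ q.2)).map Prod.fst).count v
      = pvG v p cs := by
  induction cs generalizing p with
  | nil => rfl
  | cons c cs ih =>
    simp only [ne_eq, decide_not] at ih
    by_cases h : c = p
    · subst h
      simp only [List.zip_cons_cons, List.filter_cons, pvG]
      simp [ih]
    · simp only [List.zip_cons_cons, List.filter_cons, pvG]
      by_cases hv : c = v
      · subst hv
        simp [h, ih]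
        try omega
      · simp [h, hv, ih]

theorem pvLoopA_eq (l : List Char) (num op : Int) (ant : Char) :
    pvLoopA l num op ant
      = (num + (pvG 0 (pvCls ant) (l.map pvCls) : Int),
         op + (pvG 1 (pvCls ant) (l.map pvCls) : Int)) := by
  induction l generalizing num op ant with
  | nil => simp [pvLoopA, pvG]
  | cons act rest ih =>
    simp only [pvLoopA, List.map_cons, pvG]
    by_cases h1 : (esNumero_o_Punto act && !esNumero_o_Punto ant) = true
    · rw [if_pos h1, ih]
      simp only [Bool.and_eq_true, Bool.not_eq_true'] at h1
      have hc : pvCls act = 0 := (pvCls_zero act).mpr h1.1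
      have hp : pvCls ant ≠ 0 := by
        intro h
        have := (pvCls_zero ant).mp h
        rw [h1.2] at this
        exact absurd this (by decide)
      have hy : pvCls act = 0 ∧ pvCls act ≠ pvCls ant := ⟨hc, by omega⟩
      have hn : ¬ (pvCls act = 1 ∧ pvCls act ≠ pvCls ant) := by
        intro hh
        omega
      rw [if_pos hy, if_neg hn]
      simp only [Prod.mk.injEq]
      push_cast
      constructor <;> ring
    · rw [if_neg h1]
      by_cases h2 : (esOperador act && !esOperador ant) = true
      · rw [if_pos h2, ih]
        simp only [Bool.and_eq_true, Bool.not_eq_true'] at h2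
        have hc : pvCls act = 1 := (pvCls_one act).mpr h2.1
        have hp : pvCls ant ≠ 1 := by
          intro h
          have := (pvCls_one ant).mp h
          rw [h2.2] at this
          exact absurd this (by decide)
        have hy : pvCls act = 1 ∧ pvCls act ≠ pvCls ant := ⟨hc, by omega⟩
        have hn : ¬ (pvCls act = 0 ∧ pvCls act ≠ pvCls ant) := by
          intro hh
          omega
        rw [if_neg hn, if_pos hy]
        simp only [Prod.mk.injEq]
        push_cast
        constructor <;> ring
      · rw [if_neg h2, ih]
        have h1' : esNumero_o_Punto act = true → esNumero_o_Punto ant = true := by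
          intro ha
          by_contra hb
          rw [Bool.not_eq_true] at hb
          exact h1 (by simp [ha, hb])
        have h2' : esOperador act = true → esOperador ant = true := by
          intro ha
          by_contra hb
          rw [Bool.not_eq_true] at hb
          exact h2 (by simp [ha, hb])
        have hn0 : ¬ (pvCls act = 0 ∧ pvCls act ≠ pvCls ant) := by
          intro hh
          have ha := (pvCls_zero act).mp hh.1
          have hb := (pvCls_zero ant).mpr (h1' ha)
          exact hh.2 (by rw [hh.1, hb])
        have hn1 : ¬ (pvCls act = 1 ∧ pvCls act ≠ pvCls ant) := by
          intro hh
          have ha := (pvCls_one act).mp hh.1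
          have hb := (pvCls_one ant).mpr (h2' ha)
          exact hh.2 (by rw [hh.1, hb])
        rw [if_neg hn0, if_neg hn1]
        simp

theorem pvG_start (v p p' : Nat) (hv : v ≠ p) (hv' : v ≠ p') (cs : List Nat) :
    pvG v p cs = pvG v p' cs := by
  cases cs with
  | nil => rfl
  | cons c cs =>
    simp only [pvG]
    congr 1
    by_cases h : c = v
    · subst h
      simp [hv, hv']
    · simp [h]

-- ===== VERDICT (by name: the statement is the Claim_ definition above) =====
theorem checarOperaYNumer_spec : Claim_equal_checarOperaYNumer := by
  intro str _
  unfold Spec_checarOperaYNumer checarOperaYNumer checarOperaYNumer_alt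
  simp only [pvLoopA_eq, pvZipCount]
  rw [pvG_start 0 (pvCls '#') 3 (by decide) (by decide),
      pvG_start 1 (pvCls '#') 3 (by decide) (by decide)]
  simp only [zero_add, gt_iff_lt, Nat.cast_lt]
  by_cases h : pvG 1 3 (str.toList.map pvCls) < pvG 0 3 (str.toList.map pvCls)
  · simp [h]
  · simp [h]
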